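-- pv_equiv track=rewrite | github.com/dallyy/code-by-python | 数学相关模板/数学.py | fps_div_sparse
-- ===== SOURCE A (Python) =====
-- def fps_div_sparse(a, b, deg=-1):
--     """
--     稀疏形式幂级数除法优化版本
--     仅对b的非零项进行计算
--     """
--     if deg == -1:
--         deg = max(len(a), len(b))
--     if not b or b[0] % mod == 0:
--         raise ZeroDivisionError("b[0] == 0 mod mod")
--
--     inv_b0 = pow(b[0] % mod, mod - 2, mod)
--
--     b_nz = {i: bi % mod for i, bi in enumerate(b) if bi % mod != 0}
--
--     q = [0] * deg
--     for n in range(deg):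
--         s = a[n] % mod if n < len(a) else 0
--         for i, bi in b_nz.items():
--             if i == 0 or i > n:
--                 continue
--             s = (s - bi * q[n - i]) % mod
--         q[n] = s * inv_b0 % mod
--
--     return q
--
-- mod = 998244353
-- ===== SOURCE B (Python) =====
-- mod = 998244353
--
-- def fps_div_sparse(a, b, deg=-1):
--     """Forward 'push' elimination: q holds running residuals; each finalized
--     coefficient is scattered onto the later residuals it affects."""
--     if deg == -1:
--         deg = max(len(a), len(b))
--     if not b or b[0] % mod == 0:
--         raise ZeroDivisionError("b[0] == 0 mod mod")
--
--     inv_b0 = pow(b[0] % mod, mod - 2, mod)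
--     b_nz = [(i, bi % mod) for i, bi in enumerate(b) if i >= 1 and bi % mod != 0]
--
--     q = [a[n] % mod if n < len(a) else 0 for n in range(deg)]
--     for n in range(deg):
--         q[n] = q[n] * inv_b0 % mod
--         for i, bi in b_nz:
--             if n + i < deg:
--                 q[n + i] = (q[n + i] - bi * q[n]) % mod
--     return q
-- ===== Notes on version B (the rewrite author's own statement) =====
-- stated objective: alternative
-- what changed: Replaces A's backward 'pull' (each q[n] gathers sum of b_i*q[n-i] over earlier coefficients) by a forward 'push' elimination: q is initialized with the numerator residuals and each finalized coefficient q[n] is immediately scattered onto the later residuals q[n+i], reversing the data-flow direction; the i==0/i>n guards and the dict of nonzero b-terms disappear.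
import Mathlib
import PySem

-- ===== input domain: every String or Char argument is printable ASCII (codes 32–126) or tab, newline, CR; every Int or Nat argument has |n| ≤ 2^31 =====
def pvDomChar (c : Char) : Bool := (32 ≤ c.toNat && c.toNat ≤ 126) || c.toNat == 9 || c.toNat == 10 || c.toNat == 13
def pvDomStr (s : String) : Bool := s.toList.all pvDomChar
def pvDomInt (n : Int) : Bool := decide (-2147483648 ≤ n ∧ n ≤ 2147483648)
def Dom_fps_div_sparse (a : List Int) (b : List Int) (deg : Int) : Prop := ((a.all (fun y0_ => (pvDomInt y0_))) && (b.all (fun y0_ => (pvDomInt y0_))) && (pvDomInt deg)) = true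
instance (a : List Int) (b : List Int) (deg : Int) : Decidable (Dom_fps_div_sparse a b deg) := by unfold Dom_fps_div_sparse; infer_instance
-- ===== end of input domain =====

-- B replaces A's backward 'pull' convolution sum by a forward 'push' elimination over running
-- residuals (same O(deg·nnz(b)) cost; objective: alternative decomposition, not speed).

-- the module-level constant 'mod'
def pvM : Int := 998244353

-- hand-ported Python built-in pow(b, e, m) (three-argument modular pow), exact for e ≥ 0 and
-- m > 1 as used here; binary exponentiation (PySem.Int.powMod is linear in e, too slow to run)
def pvPowMod (b : Int) (e : Nat) (m : Int) : Int :=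
  if e = 0 then PySem.Int.mod 1 m
  else
    let h := pvPowMod b (e / 2) m
    let h2 := PySem.Int.mod (h * h) m
    if e % 2 = 1 then PySem.Int.mod (h2 * b) m else h2

-- ===== PORT A =====
-- loop body of A's 'for n in range(deg)': backward pull, then write q[n]
def pvStepA (a : List Int) (nz : List (Int × Int)) (inv : Int) (q : List Int) (n : Int) : List Int :=
  let s0 := if n < PySem.List.len a then PySem.Int.mod (PySem.List.pyGetD a n 0) pvM else 0
  let s := nz.foldl (fun s p =>
    if p.1 = 0 ∨ p.1 > n then s
    else PySem.Int.mod (s - p.2 * PySem.List.pyGetD q (n - p.1) 0) pvM) s0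
  PySem.List.pySetD q n (PySem.Int.mod (s * inv) pvM)

def fps_div_sparse (a : List Int) (b : List Int) (deg : Int) : List Int :=
  let deg := if deg = -1 then ((max a.length b.length : Nat) : Int) else deg
  if b = [] ∨ PySem.Int.mod b.headI pvM = 0 then []   -- raise ZeroDivisionError (excluded by Pre_)
  else
    let inv_b0 := pvPowMod (PySem.Int.mod b.headI pvM) 998244351 pvM
    let b_nz := (PySem.List.enumerate b 0).filterMap (fun p =>
      if PySem.Int.mod p.2 pvM ≠ 0 then some (p.1, PySem.Int.mod p.2 pvM) else none)
    (PySem.List.pyRange 0 deg 1).foldl (pvStepA a b_nz inv_b0) (List.replicate deg.toNat 0)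

-- ===== PORT B =====
-- scatter of the finalized q[n] onto later residuals (inner 'for i, bi in b_nz')
def pvScatterB (nz : List (Int × Int)) (deg : Int) (n : Int) (q : List Int) : List Int :=
  nz.foldl (fun q p =>
    if n + p.1 < deg then
      PySem.List.pySetD q (n + p.1)
        (PySem.Int.mod (PySem.List.pyGetD q (n + p.1) 0 - p.2 * PySem.List.pyGetD q n 0) pvM)
    else q) q

-- loop body of B's 'for n in range(deg)': finalize q[n], then scatter
def pvStepB (nz : List (Int × Int)) (inv : Int) (deg : Int) (q : List Int) (n : Int) : List Int :=
  let q := PySem.List.pySetD q n (PySem.Int.mod (PySem.List.pyGetD q n 0 * inv) pvM)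
  pvScatterB nz deg n q

def fps_div_sparse_alt (a : List Int) (b : List Int) (deg : Int) : List Int :=
  let deg := if deg = -1 then ((max a.length b.length : Nat) : Int) else deg
  if b = [] ∨ PySem.Int.mod b.headI pvM = 0 then []   -- raise ZeroDivisionError (excluded by Pre_)
  else
    let inv_b0 := pvPowMod (PySem.Int.mod b.headI pvM) 998244351 pvM
    let b_nz := (PySem.List.enumerate b 0).filterMap (fun p =>
      if 1 ≤ p.1 ∧ PySem.Int.mod p.2 pvM ≠ 0 then some (p.1, PySem.Int.mod p.2 pvM) else none)
    let q0 := (PySem.List.pyRange 0 deg 1).map (fun n =>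
      if n < PySem.List.len a then PySem.Int.mod (PySem.List.pyGetD a n 0) pvM else 0)
    (PySem.List.pyRange 0 deg 1).foldl (pvStepB b_nz inv_b0 deg) q0

-- ===== PRECONDITION & SPEC =====
-- Pre_ excludes exactly the inputs where A raises ZeroDivisionError: b empty or b[0] ≡ 0 (mod 998244353).
def Pre_fps_div_sparse (a : List Int) (b : List Int) (deg : Int) : Prop :=
  b ≠ [] ∧ PySem.Int.mod b.headI pvM ≠ 0
instance (a : List Int) (b : List Int) (deg : Int) : Decidable (Pre_fps_div_sparse a b deg) := by
  unfold Pre_fps_div_sparse; infer_instance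

def pvWitness_fps_div_sparse : List Int × List Int × Int := ([1, 2, 3], [1, 0, 4], -1)

def Spec_fps_div_sparse (a : List Int) (b : List Int) (deg : Int) (out : List Int) : Prop := out = fps_div_sparse_alt a b deg
instance (a : List Int) (b : List Int) (deg : Int) (out : List Int) : Decidable (Spec_fps_div_sparse a b deg out) := by unfold Spec_fps_div_sparse; infer_instance

-- ===== CLAIM (what is proved, stated in full; the proofs are below) =====
def Claim_equal_fps_div_sparse : Prop := ∀ (a : List Int) (b : List Int) (deg : Int), Dom_fps_div_sparse a b deg → Pre_fps_div_sparse a b deg → Spec_fps_div_sparse a b deg (fps_div_sparse a b deg)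

-- ===== LEMMAS AND PROOFS =====

theorem pvM_pos : (0:Int) < pvM := by decide

-- initial residual: a[n] % mod for n < len(a), else 0
def pvF0 (a : List Int) (n : Nat) : Int :=
  if (n : Int) < PySem.List.len a then PySem.Int.mod (PySem.List.pyGetD a (n : Int) 0) pvM else 0

-- canonical prefix of quotient coefficients, built front to back
def pvQL (f0 : Nat → Int) (nz : List (Int × Int)) (inv : Int) : Nat → List Int
  | 0 => []
  | n+1 =>
    let prev := pvQL f0 nz inv n
    prev ++ [PySem.Int.mod ((f0 n -
      (nz.map (fun p => if 1 ≤ p.1 ∧ p.1 ≤ (n:Int) then p.2 * prev.getD (n - p.1.toNat) 0 else 0)).sum) * inv) pvM]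

def pvQ (f0 : Nat → Int) (nz : List (Int × Int)) (inv : Int) (n : Nat) : Int :=
  (pvQL f0 nz inv (n+1)).getD n 0

theorem pvQL_length (f0 : Nat → Int) (nz : List (Int × Int)) (inv : Int) (n : Nat) :
    (pvQL f0 nz inv n).length = n := by
  induction n with
  | zero => simp [pvQL]
  | succ n ih => simp [pvQL, ih]

theorem pvQL_succ (f0 : Nat → Int) (nz : List (Int × Int)) (inv : Int) (n : Nat) :
    pvQL f0 nz inv (n+1) = pvQL f0 nz inv n ++ [pvQ f0 nz inv n] := by
  have hl := pvQL_length f0 nz inv n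
  conv_lhs => rw [pvQL]
  congr 1
  simp only [pvQ, pvQL]
  rw [List.getD_append_right _ _ _ _ (by omega)]
  simp [hl]

theorem pvQL_getD (f0 : Nat → Int) (nz : List (Int × Int)) (inv : Int) (n j : Nat) (h : j < n) :
    (pvQL f0 nz inv n).getD j 0 = pvQ f0 nz inv j := by
  induction n with
  | zero => omega
  | succ n ih =>
    rw [pvQL_succ]
    rcases Nat.lt_or_ge j n with hj | hj
    · rw [List.getD_append _ _ _ _ (by rw [pvQL_length]; exact hj)]
      exact ih hj
    · have hjn : j = n := by omega
      subst hjn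
      rw [List.getD_append_right _ _ _ _ (by rw [pvQL_length])]
      simp [pvQL_length]

theorem pvQ_eq (f0 : Nat → Int) (nz : List (Int × Int)) (inv : Int) (n : Nat) :
    pvQ f0 nz inv n = PySem.Int.mod ((f0 n -
      (nz.map (fun p => if 1 ≤ p.1 ∧ p.1 ≤ (n:Int) then p.2 * pvQ f0 nz inv (n - p.1.toNat) else 0)).sum) * inv) pvM := by
  have hl := pvQL_length f0 nz inv n
  have hx : pvQ f0 nz inv n = PySem.Int.mod ((f0 n -
      (nz.map (fun p => if 1 ≤ p.1 ∧ p.1 ≤ (n:Int) then p.2 * (pvQL f0 nz inv n).getD (n - p.1.toNat) 0 else 0)).sum) * inv) pvM := by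
    simp only [pvQ]
    conv_lhs => rw [pvQL]
    rw [List.getD_append_right _ _ _ _ (by omega)]
    simp [hl]
  rw [hx]
  congr 3
  refine congrArg List.sum (List.map_congr_left ?_)
  intro p _
  split_ifs with hc
  · congr 1
    exact pvQL_getD f0 nz inv n (n - p.1.toNat) (by omega)
  · rfl

-- the inner pull loop accumulates, mod pvM, the initial value minus the sum of the non-skipped terms
theorem pvFoldSub {α : Type} (l : List α) (C : α → Prop) [DecidablePred C] (g w : α → Int)
    (s0 t0 : Int) (h0 : s0 ≡ t0 [ZMOD pvM]) (hg : ∀ p ∈ l, ¬ C p → g p = w p) :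
    l.foldl (fun s p => if C p then s else PySem.Int.mod (s - g p) pvM) s0
      ≡ t0 - (l.map (fun p => if C p then 0 else w p)).sum [ZMOD pvM] := by
  induction l generalizing s0 t0 with
  | nil => simpa using h0
  | cons p l ih =>
    simp only [List.foldl_cons, List.map_cons, List.sum_cons]
    by_cases hc : C p
    · rw [if_pos hc, if_pos hc, zero_add]
      exact ih s0 t0 h0 (fun q hq hq2 => hg q (by simp [hq]) hq2)
    · rw [if_neg hc, if_neg hc, sub_add_eq_sub_sub]
      apply ih _ (t0 - w p) _ (fun q hq hq2 => hg q (by simp [hq]) hq2)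
      rw [PySem.Int.mod_eq_emod_of_pos pvM_pos, hg p (by simp) hc]
      exact (Int.mod_modEq _ _).trans (h0.sub (Int.ModEq.refl (w p)))

theorem pvModCongr (x y i : Int) (h : x ≡ y [ZMOD pvM]) :
    PySem.Int.mod (x * i) pvM = PySem.Int.mod (y * i) pvM := by
  rw [PySem.Int.mod_eq_emod_of_pos pvM_pos, PySem.Int.mod_eq_emod_of_pos pvM_pos]
  exact h.mul_right i

theorem pvLemA (a : List Int) (nz : List (Int × Int)) (inv : Int)
    (hnz : ∀ p ∈ nz, 0 ≤ p.1) :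
    ∀ (t k : Nat) (r : List Int), t ≤ r.length →
    (PySem.List.pyRange (k:Int) ((k:Int)+(t:Int)) 1).foldl (pvStepA a nz inv)
        (pvQL (pvF0 a) nz inv k ++ r)
      = pvQL (pvF0 a) nz inv (k+t) ++ r.drop t := by
  intro t
  induction t with
  | zero =>
    intro k r hr
    rw [PySem.List.pyRange_one_eq_nil (by push_cast; omega)]
    simp
  | succ t ih =>
    intro k r hr
    obtain ⟨r0, r', rfl⟩ : ∃ r0 r', r = r0 :: r' := by
      cases r with
      | nil => simp at hr
      | cons r0 r' => exact ⟨r0, r', rfl⟩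
    have hb : ((k:Int) + ((t+1:Nat):Int)) = ((k:Int)+1) + (t:Int) := by push_cast; ring
    rw [hb, PySem.List.pyRange_one_cons (by omega)]
    simp only [List.foldl_cons]
    have hlen := pvQL_length (pvF0 a) nz inv k
    have hstep : pvStepA a nz inv (pvQL (pvF0 a) nz inv k ++ r0 :: r') (k:Int)
        = pvQL (pvF0 a) nz inv (k+1) ++ r' := by
      simp only [pvStepA]
      have hsum : (nz.map (fun p => if p.1 = 0 ∨ p.1 > (k:Int) then 0 else p.2 * pvQ (pvF0 a) nz inv (k - p.1.toNat))).sum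
          = (nz.map (fun p => if 1 ≤ p.1 ∧ p.1 ≤ (k:Int) then p.2 * pvQ (pvF0 a) nz inv (k - p.1.toNat) else 0)).sum := by
        refine congrArg List.sum (List.map_congr_left ?_)
        intro p hp
        have := hnz p hp
        split_ifs <;> first | rfl | omega
      have hfs := pvFoldSub nz (fun p => p.1 = 0 ∨ p.1 > (k:Int))
        (fun p => p.2 * PySem.List.pyGetD (pvQL (pvF0 a) nz inv k ++ r0 :: r') ((k:Int) - p.1) 0)
        (fun p => p.2 * pvQ (pvF0 a) nz inv (k - p.1.toNat))
        (if (k:Int) < PySem.List.len a then PySem.Int.mod (PySem.List.pyGetD a (k:Int) 0) pvM else 0)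
        (pvF0 a k) (by rw [pvF0]) (by
          intro p hp hCp
          have h0p := hnz p hp
          simp only [not_or, not_lt] at hCp
          have hidx : (k:Int) - p.1 = ((k - p.1.toNat : Nat) : Int) := by omega
          dsimp only
          rw [hidx, PySem.List.pyGetD_natCast,
            List.getD_append _ _ _ _ (by rw [hlen]; omega),
            pvQL_getD _ _ _ _ _ (by omega)])
      have hs2 : (nz.foldl (fun s p =>
          if p.1 = 0 ∨ p.1 > (k:Int) then s
          else PySem.Int.mod (s - p.2 * PySem.List.pyGetD (pvQL (pvF0 a) nz inv k ++ r0 :: r') ((k:Int) - p.1) 0) pvM)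
            (if (k:Int) < PySem.List.len a then PySem.Int.mod (PySem.List.pyGetD a (k:Int) 0) pvM else 0))
          ≡ pvF0 a k -
            (nz.map (fun p => if 1 ≤ p.1 ∧ p.1 ≤ (k:Int) then p.2 * pvQ (pvF0 a) nz inv (k - p.1.toNat) else 0)).sum [ZMOD pvM] := by
        rw [← hsum]; exact hfs
      have hv : PySem.Int.mod ((nz.foldl (fun s p =>
          if p.1 = 0 ∨ p.1 > (k:Int) then s
          else PySem.Int.mod (s - p.2 * PySem.List.pyGetD (pvQL (pvF0 a) nz inv k ++ r0 :: r') ((k:Int) - p.1) 0) pvM)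
            (if (k:Int) < PySem.List.len a then PySem.Int.mod (PySem.List.pyGetD a (k:Int) 0) pvM else 0)) * inv) pvM
          = pvQ (pvF0 a) nz inv k := by
        rw [pvQ_eq (pvF0 a) nz inv k]
        exact pvModCongr _ _ inv hs2
      rw [hv, pvQL_succ, List.append_assoc]
      simp [hlen]
    rw [hstep]
    have h2 := ih (k+1) r' (by simp at hr ⊢; omega)
    push_cast at h2
    rw [show k + (t+1) = (k+1) + t from by omega, List.drop_succ_cons]
    exact h2

-- scatter loop: length preserved, untouched entries unchanged, touched entries congruent
theorem pvScatterLem (l : List (Int × Int)) (hl : ∀ p ∈ l, 1 ≤ p.1) (d k : Nat) (c : Int) :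
    ∀ (q : List Int), q.length = d → q.getD k 0 = c →
    (pvScatterB l (d:Int) (k:Int) q).length = d ∧
    (∀ j : Nat, (∀ p ∈ l, (k:Int) + p.1 ≠ (j:Int)) →
      (pvScatterB l (d:Int) (k:Int) q).getD j 0 = q.getD j 0) ∧
    (∀ j : Nat, j < d →
      (pvScatterB l (d:Int) (k:Int) q).getD j 0
        ≡ q.getD j 0 - (l.map (fun p => if (k:Int) + p.1 = (j:Int) then p.2 * c else 0)).sum [ZMOD pvM]) := by
  induction l with
  | nil =>
    intro q hq hc
    refine ⟨hq, fun j _ => rfl, fun j hj => ?_⟩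
    simp only [List.map_nil, List.sum_nil, sub_zero]
    exact Int.ModEq.refl _
  | cons p0 l ih =>
    intro q hq hc
    have hp0 : (1:Int) ≤ p0.1 := hl p0 (by simp)
    have hl' : ∀ p ∈ l, (1:Int) ≤ p.1 := fun p hp => hl p (by simp [hp])
    rw [show pvScatterB (p0::l) (d:Int) (k:Int) q = pvScatterB l (d:Int) (k:Int)
      (if (k:Int)+p0.1 < (d:Int) then PySem.List.pySetD q ((k:Int)+p0.1)
        (PySem.Int.mod (PySem.List.pyGetD q ((k:Int)+p0.1) 0 - p0.2 * PySem.List.pyGetD q (k:Int) 0) pvM)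
       else q) from rfl]
    by_cases hg : (k:Int) + p0.1 < (d:Int)
    · rw [if_pos hg]
      have hj0cast : ((k:Int) + p0.1) = ((((k:Int) + p0.1).toNat : Nat) : Int) := by omega
      set j0 : Nat := ((k:Int) + p0.1).toNat with hj0def
      have hj0d : j0 < d := by omega
      have hkj0 : k ≠ j0 := by omega
      rw [hj0cast, PySem.List.pySetD_natCast, PySem.List.pyGetD_natCast, PySem.List.pyGetD_natCast, hc]
      have hq1len : (q.set j0 (PySem.Int.mod (q.getD j0 0 - p0.2 * c) pvM)).length = d := by
        simp [hq]
      have hq1c : (q.set j0 (PySem.Int.mod (q.getD j0 0 - p0.2 * c) pvM)).getD k 0 = c := by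
        rw [List.getD, List.getElem?_set_ne (by omega), ← List.getD, hc]
      obtain ⟨ihl, ihu, ihc⟩ := ih hl' _ hq1len hq1c
      refine ⟨ihl, ?_, ?_⟩
      · intro j hj
        have hjne : (j:Int) ≠ (k:Int) + p0.1 := (hj p0 (by simp)).symm
        rw [ihu j (fun p hp => hj p (by simp [hp]))]
        rw [List.getD, List.getElem?_set_ne (by omega), ← List.getD]
      · intro j hj
        refine (ihc j hj).trans ?_
        simp only [List.map_cons, List.sum_cons]
        by_cases hjj : (k:Int) + p0.1 = (j:Int)
        · have hj0j : j0 = j := by omega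
          rw [if_pos hjj, hj0j]
          rw [List.getD, List.getElem?_set_self (by omega), Option.getD_some]
          have : PySem.Int.mod (q.getD j 0 - p0.2 * c) pvM ≡ q.getD j 0 - p0.2 * c [ZMOD pvM] := by
            rw [PySem.Int.mod_eq_emod_of_pos pvM_pos]
            exact Int.mod_modEq _ _
          calc PySem.Int.mod (q.getD j 0 - p0.2 * c) pvM -
                (l.map (fun p => if (k:Int) + p.1 = (j:Int) then p.2 * c else 0)).sum
              ≡ q.getD j 0 - p0.2 * c -
                (l.map (fun p => if (k:Int) + p.1 = (j:Int) then p.2 * c else 0)).sum [ZMOD pvM] :=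
                this.sub (Int.ModEq.refl _)
            _ = q.getD j 0 - (p0.2 * c +
                (l.map (fun p => if (k:Int) + p.1 = (j:Int) then p.2 * c else 0)).sum) := by ring
        · rw [if_neg hjj, List.getD, List.getElem?_set_ne (by omega), ← List.getD]
          rw [zero_add]
    · rw [if_neg hg]
      obtain ⟨ihl, ihu, ihc⟩ := ih hl' q hq hc
      refine ⟨ihl, fun j hj => ihu j (fun p hp => hj p (by simp [hp])), ?_⟩
      intro j hj
      refine (ihc j hj).trans ?_
      simp only [List.map_cons, List.sum_cons]
      rw [if_neg (by omega), zero_add]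

-- B's invariant: entries below k are final, entries from k on hold the running residual
def pvInvB (f0 : Nat → Int) (nz : List (Int × Int)) (inv : Int) (d k : Nat) (q : List Int) : Prop :=
  q.length = d ∧
  (∀ j : Nat, j < d → j < k → q.getD j 0 = pvQ f0 nz inv j) ∧
  (∀ j : Nat, j < d → k ≤ j → q.getD j 0 ≡ f0 j -
    (nz.map (fun p => if 1 ≤ p.1 ∧ p.1 ≤ (j:Int) ∧ (j:Int) - p.1 < (k:Int) then p.2 * pvQ f0 nz inv (j - p.1.toNat) else 0)).sum [ZMOD pvM])

-- the filtered b_nz of B is A's b_nz restricted to keys ≥ 1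
theorem pvNzFilter (b : List Int) :
    (PySem.List.enumerate b 0).filterMap (fun p =>
      if 1 ≤ p.1 ∧ PySem.Int.mod p.2 pvM ≠ 0 then some (p.1, PySem.Int.mod p.2 pvM) else none)
    = ((PySem.List.enumerate b 0).filterMap (fun p =>
      if PySem.Int.mod p.2 pvM ≠ 0 then some (p.1, PySem.Int.mod p.2 pvM) else none)).filter
        (fun p => decide (1 ≤ p.1)) := by
  induction PySem.List.enumerate b 0 with
  | nil => rfl
  | cons p l ih =>
    simp only [List.filterMap_cons]
    by_cases h1 : PySem.Int.mod p.2 pvM ≠ 0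
    · by_cases h2 : 1 ≤ p.1
      · rw [if_pos ⟨h2, h1⟩, if_pos h1]
        simp [h2, ih]
      · rw [if_neg (by tauto), if_pos h1]
        simp [h2, ih]
    · rw [if_neg (by tauto), if_neg h1]
      exact ih

theorem pvNzKeys (b : List Int) (p : Int × Int)
    (hp : p ∈ (PySem.List.enumerate b 0).filterMap (fun p =>
      if PySem.Int.mod p.2 pvM ≠ 0 then some (p.1, PySem.Int.mod p.2 pvM) else none)) :
    0 ≤ p.1 := by
  rcases List.mem_filterMap.mp hp with ⟨x, hx, hfx⟩
  rcases (PySem.List.mem_enumerate_iff _ _ _).mp hx with ⟨k, hk, rfl⟩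
  split at hfx
  · cases hfx; simp
  · cases hfx

theorem pvSumFilter {α : Type} (l : List α) (P : α → Bool) (f : α → Int) :
    ((l.filter P).map f).sum = (l.map (fun p => if P p then f p else 0)).sum := by
  induction l with
  | nil => rfl
  | cons p l ih =>
    by_cases h : P p <;> simp [h, ih]

set_option maxHeartbeats 1000000 in
theorem pvStepBLem (f0 : Nat → Int) (nz : List (Int × Int)) (inv : Int) (d k : Nat)
    (hk : k < d) (q : List Int)
    (hInv : pvInvB f0 nz inv d k q) :
    pvInvB f0 nz inv d (k+1) (pvStepB (nz.filter (fun p => decide (1 ≤ p.1))) inv (d:Int) q (k:Int)) := by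
  obtain ⟨hlen, hfin, hres⟩ := hInv
  have hresk := hres k hk (le_refl k)
  have hsumk : (nz.map (fun p => if 1 ≤ p.1 ∧ p.1 ≤ (k:Int) ∧ (k:Int) - p.1 < (k:Int) then p.2 * pvQ f0 nz inv (k - p.1.toNat) else 0)).sum
      = (nz.map (fun p => if 1 ≤ p.1 ∧ p.1 ≤ (k:Int) then p.2 * pvQ f0 nz inv (k - p.1.toNat) else 0)).sum := by
    refine congrArg List.sum (List.map_congr_left ?_)
    intro p hp
    split_ifs <;> first | rfl | omega
  have hc : PySem.Int.mod (q.getD k 0 * inv) pvM = pvQ f0 nz inv k := by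
    rw [pvQ_eq f0 nz inv k]
    refine pvModCongr _ _ inv ?_
    rw [← hsumk]
    exact hresk
  have hfil : ∀ p ∈ nz.filter (fun p => decide (1 ≤ p.1)), (1:Int) ≤ p.1 := by
    intro p hp
    have := List.mem_filter.mp hp
    simpa using this.2
  simp only [pvStepB, PySem.List.pySetD_natCast, PySem.List.pyGetD_natCast, hc]
  set q1 := q.set k (pvQ f0 nz inv k) with hq1
  have hq1len : q1.length = d := by simp [hq1, hlen]
  have hq1k : q1.getD k 0 = pvQ f0 nz inv k := by
    have hkq : k < q1.length := by rw [hq1len]; exact hk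
    rw [List.getD_eq_getElem _ _ hkq]
    simp [hq1]
  have hq1ne : ∀ j : Nat, j ≠ k → q1.getD j 0 = q.getD j 0 := by
    intro j hj
    rw [hq1, List.getD, List.getElem?_set_ne (by omega), ← List.getD]
  obtain ⟨sl, su, sc⟩ := pvScatterLem (nz.filter (fun p => decide (1 ≤ p.1))) hfil d k
    (pvQ f0 nz inv k) q1 hq1len hq1k
  refine ⟨sl, ?_, ?_⟩
  · intro j hjd hjk1
    rcases Nat.lt_or_ge j k with hjk | hjk
    · rw [su j (fun p hp => by have := hfil p hp; omega), hq1ne j (by omega)]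
      exact hfin j hjd hjk
    · have hjeq : j = k := by omega
      subst hjeq
      rw [su j (fun p hp => by have := hfil p hp; omega)]
      exact hq1k
  · intro j hjd hjk1
    have hjk : k ≤ j := by omega
    have hjne : j ≠ k := by omega
    refine (sc j hjd).trans ?_
    rw [hq1ne j hjne]
    have hscat : ((nz.filter (fun p => decide (1 ≤ p.1))).map
        (fun p => if (k:Int) + p.1 = (j:Int) then p.2 * pvQ f0 nz inv k else 0)).sum
        = (nz.map (fun p => if (1:Int) ≤ p.1 then (if (k:Int) + p.1 = (j:Int) then p.2 * pvQ f0 nz inv k else 0) else 0)).sum := by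
      rw [pvSumFilter]
      refine congrArg List.sum (List.map_congr_left ?_)
      intro p hp
      by_cases h1 : (1:Int) ≤ p.1 <;> simp [h1]
    have hsplit : (nz.map (fun p => if 1 ≤ p.1 ∧ p.1 ≤ (j:Int) ∧ (j:Int) - p.1 < ((k+1:Nat):Int) then p.2 * pvQ f0 nz inv (j - p.1.toNat) else 0)).sum
        = (nz.map (fun p => if 1 ≤ p.1 ∧ p.1 ≤ (j:Int) ∧ (j:Int) - p.1 < (k:Int) then p.2 * pvQ f0 nz inv (j - p.1.toNat) else 0)).sum
          + (nz.map (fun p => if (1:Int) ≤ p.1 then (if (k:Int) + p.1 = (j:Int) then p.2 * pvQ f0 nz inv k else 0) else 0)).sum := by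
      rw [← PySem.List.sum_map_add_int]
      refine congrArg List.sum (List.map_congr_left ?_)
      intro p hp
      by_cases h1 : (1:Int) ≤ p.1
      · by_cases h2 : (k:Int) + p.1 = (j:Int)
        · have hjp : j - p.1.toNat = k := by omega
          rw [if_pos h1, if_pos h2, if_pos (by push_cast; omega), if_neg (by omega), hjp]
          ring
        · rw [if_pos h1, if_neg h2]
          have hiff : (1 ≤ p.1 ∧ p.1 ≤ (j:Int) ∧ (j:Int) - p.1 < ((k+1:Nat):Int)) ↔ (1 ≤ p.1 ∧ p.1 ≤ (j:Int) ∧ (j:Int) - p.1 < (k:Int)) := by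
            constructor <;> rintro ⟨u1, u2, u3⟩ <;> refine ⟨u1, u2, by push_cast at u3 ⊢; omega⟩
          rw [if_congr hiff rfl rfl]
          ring
      · rw [if_neg h1, if_neg (by tauto), if_neg (by tauto)]
        ring
    rw [hscat]
    calc q.getD j 0 - (nz.map (fun p => if (1:Int) ≤ p.1 then (if (k:Int) + p.1 = (j:Int) then p.2 * pvQ f0 nz inv k else 0) else 0)).sum
        ≡ f0 j - (nz.map (fun p => if 1 ≤ p.1 ∧ p.1 ≤ (j:Int) ∧ (j:Int) - p.1 < (k:Int) then p.2 * pvQ f0 nz inv (j - p.1.toNat) else 0)).sum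
          - (nz.map (fun p => if (1:Int) ≤ p.1 then (if (k:Int) + p.1 = (j:Int) then p.2 * pvQ f0 nz inv k else 0) else 0)).sum [ZMOD pvM] :=
        (hres j hjd hjk).sub (Int.ModEq.refl _)
      _ = f0 j - (nz.map (fun p => if 1 ≤ p.1 ∧ p.1 ≤ (j:Int) ∧ (j:Int) - p.1 < ((k+1:Nat):Int) then p.2 * pvQ f0 nz inv (j - p.1.toNat) else 0)).sum := by
        rw [hsplit]; ring

theorem pvLemB (f0 : Nat → Int) (nz : List (Int × Int)) (inv : Int) (d : Nat) :
    ∀ (t k : Nat) (q : List Int), k + t = d → pvInvB f0 nz inv d k q →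
    (PySem.List.pyRange (k:Int) ((k:Int)+(t:Int)) 1).foldl (pvStepB (nz.filter (fun p => decide (1 ≤ p.1))) inv (d:Int)) q
      = pvQL f0 nz inv d := by
  intro t
  induction t with
  | zero =>
    intro k q hkd hInv
    rw [PySem.List.pyRange_one_eq_nil (by push_cast; omega)]
    simp only [List.foldl_nil]
    obtain ⟨hlen, hfin, _⟩ := hInv
    apply List.ext_getElem (by rw [hlen, pvQL_length])
    intro i h1 h2
    have hid : i < d := by rw [hlen] at h1; exact h1
    have := hfin i hid (by omega)
    rw [List.getD_eq_getElem _ _ h1] at this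
    rw [this, ← pvQL_getD f0 nz inv d i hid, List.getD_eq_getElem _ _ h2]
  | succ t ih =>
    intro k q hkd hInv
    have hb : ((k:Int) + ((t+1:Nat):Int)) = ((k:Int)+1) + (t:Int) := by push_cast; ring
    rw [hb, PySem.List.pyRange_one_cons (by omega)]
    simp only [List.foldl_cons]
    have h2 := ih (k+1) (pvStepB (nz.filter (fun p => decide (1 ≤ p.1))) inv (d:Int) q (k:Int))
      (by omega) (pvStepBLem f0 nz inv d k (by omega) q hInv)
    push_cast at h2
    exact h2

-- ===== VERDICT (by name: the statement is the Claim_ definition above) =====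
theorem fps_div_sparse_spec : Claim_equal_fps_div_sparse := by
  unfold Claim_equal_fps_div_sparse
  intro a b deg _hDom hPre
  unfold Spec_fps_div_sparse
  obtain ⟨hb, hb0⟩ := hPre
  have hg : ¬(b = [] ∨ PySem.Int.mod b.headI pvM = 0) := not_or.mpr ⟨hb, hb0⟩
  simp only [fps_div_sparse, fps_div_sparse_alt, if_neg hg]
  rw [pvNzFilter b]
  set deg' := if deg = -1 then ((max a.length b.length : Nat) : Int) else deg with hdeg
  set inv := pvPowMod (PySem.Int.mod b.headI pvM) 998244351 pvM with hinv
  set nzA := (PySem.List.enumerate b 0).filterMap (fun p =>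
    if PySem.Int.mod p.2 pvM ≠ 0 then some (p.1, PySem.Int.mod p.2 pvM) else none) with hnzA
  rcases (by omega : deg' ≤ 0 ∨ 0 < deg') with hneg | hpos
  · rw [PySem.List.pyRange_one_eq_nil hneg]
    simp only [List.foldl_nil, List.map_nil]
    rw [show deg'.toNat = 0 from by omega]
    rfl
  · have hdeg' : deg' = ((deg'.toNat : Nat) : Int) := by omega
    set d : Nat := deg'.toNat with hd
    rw [hdeg']
    have hkeys : ∀ p ∈ nzA, 0 ≤ p.1 := fun p hp => pvNzKeys b p hp
    -- A side
    have hA := pvLemA a nzA inv hkeys d 0 (List.replicate d 0) (by simp)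
    simp only [Nat.cast_zero, zero_add] at hA
    rw [show pvQL (pvF0 a) nzA inv 0 = [] from rfl, List.nil_append] at hA
    simp only [List.drop_replicate, Nat.sub_self, List.replicate_zero, List.append_nil] at hA
    -- B side
    set q0 := (PySem.List.pyRange 0 ((d:Nat):Int) 1).map (fun n =>
      if n < PySem.List.len a then PySem.Int.mod (PySem.List.pyGetD a n 0) pvM else 0) with hq0
    have hq0len : q0.length = d := by
      rw [hq0, List.length_map, PySem.List.length_pyRange_one]
      omega
    have hq0get : ∀ j : Nat, j < d → q0.getD j 0 = pvF0 a j := by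
      intro j hj
      rw [← PySem.List.pyGetD_natCast, hq0,
        PySem.List.pyGetD_map_pyRange_of_nonneg _ _ _ _ (by omega) (by omega)]
      rfl
    have hInv0 : pvInvB (pvF0 a) nzA inv d 0 q0 := by
      refine ⟨hq0len, fun j _ hj0 => by omega, ?_⟩
      intro j hjd _
      rw [hq0get j hjd]
      have hz : (nzA.map (fun p => if 1 ≤ p.1 ∧ p.1 ≤ (j:Int) ∧ (j:Int) - p.1 < ((0:Nat):Int) then p.2 * pvQ (pvF0 a) nzA inv (j - p.1.toNat) else 0)).sum = 0 := by
        rw [show (nzA.map (fun p => if 1 ≤ p.1 ∧ p.1 ≤ (j:Int) ∧ (j:Int) - p.1 < ((0:Nat):Int) then p.2 * pvQ (pvF0 a) nzA inv (j - p.1.toNat) else 0)) = nzA.map (fun _ => (0:Int)) from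
          List.map_congr_left (fun p _ => by rw [if_neg (by push_cast; omega)])]
        simp
      rw [hz, sub_zero]
    have hB := pvLemB (pvF0 a) nzA inv d d 0 q0 (by omega) hInv0
    simp only [Nat.cast_zero, zero_add] at hB
    rw [hA]
    exact hB.symm
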